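-- pv_equiv track=rewrite | github.com/ShivankJoginipalli/Homefinder | backend-ngin/posting_hashsets.py | intersect_sets
-- ===== SOURCE A (Python) =====
-- from typing import List, Set
--
-- def intersect_sets(sets: List[Set[int]]) -> List[int]:
--     """
--     Intersect multiple sets and return sorted list.
--     Uses set intersection operations for O(1) membership testing.
--
--     Args:
--         sets: List of sets to intersect
--
--     Returns:
--         Sorted list of elements in all sets
--     """
--     if not sets:
--         return []
--
--     # Filter out empty sets
--     filtered = [s for s in sets if s]
--     if not filtered:
--         return []
--
--     # Start with the smallest set for efficiency
--     filtered.sort(key=len)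
--     result = filtered[0].copy()
--
--     # Intersect with remaining sets
--     for s in filtered[1:]:
--         result &= s  # Set intersection
--         if not result:  # Early exit if empty
--             return []
--
--     return sorted(list(result))
-- ===== SOURCE B (Python) =====
-- from typing import List, Set
--
--
-- def intersect_sets(sets: List[Set[int]]) -> List[int]:
--     """Intersect multiple sets via a one-pass frequency table, return sorted list."""
--     if not sets:
--         return []
--     # Filter out empty sets (matching the original's behaviour of ignoring them)
--     filtered = [s for s in sets if s]
--     if not filtered:
--         return []
--     n = len(filtered)
--     counts = {}
--     for s in filtered:
--         for x in s:
--             counts[x] = counts.get(x, 0) + 1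
--     return sorted(x for x, c in counts.items() if c == n)
-- ===== Notes on version B (the rewrite author's own statement) =====
-- stated objective: alternative
-- what changed: Replaces iterated set-intersection (stable sort by size, repeated '&=' with early exit) by a single pass that counts each element's occurrences across the non-empty sets in a dict and keeps the elements whose count equals the number of non-empty sets.
import Mathlib
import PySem

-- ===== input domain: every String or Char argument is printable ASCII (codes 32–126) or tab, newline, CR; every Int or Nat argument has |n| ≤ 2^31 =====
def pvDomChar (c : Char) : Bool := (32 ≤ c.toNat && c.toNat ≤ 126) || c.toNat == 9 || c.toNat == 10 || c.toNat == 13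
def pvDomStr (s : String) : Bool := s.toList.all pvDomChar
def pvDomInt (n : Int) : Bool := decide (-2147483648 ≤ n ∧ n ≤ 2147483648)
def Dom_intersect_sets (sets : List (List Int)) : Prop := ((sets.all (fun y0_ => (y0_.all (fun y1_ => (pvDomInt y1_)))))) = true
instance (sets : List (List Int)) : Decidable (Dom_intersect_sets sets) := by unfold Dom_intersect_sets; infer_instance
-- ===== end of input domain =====

-- B replaces A's sort-by-size + iterated set-intersection with a one-pass frequency table
-- (count elements across the non-empty sets, keep those appearing in all of them); alternative, not claimed faster.

-- ===== PORT A =====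
-- 'result &= s' with early exit; final 'sorted(list(result))' (sets are Nodup lists, order irrelevant after sorting)
def pvIsectLoop (result : List Int) : List (List Int) → List Int
  | [] => PySem.List.sorted result (fun x => x) false
  | s :: rest =>
    let r := result.filter (fun x => decide (x ∈ s))
    if r = [] then [] else pvIsectLoop r rest

def intersect_sets (sets : List (List Int)) : List Int :=
  if sets = [] then []
  else
    let filtered := sets.filter (fun s => decide (s ≠ []))
    if filtered = [] then []
    else
      match PySem.List.sorted filtered (fun s => s.length) false with
      | [] => []  -- unreachable: sorted of a non-empty list is non-empty
      | first :: rest => pvIsectLoop first rest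

-- ===== PORT B =====
def intersect_sets_alt (sets : List (List Int)) : List Int :=
  if sets = [] then []
  else
    let filtered := sets.filter (fun s => decide (s ≠ []))
    if filtered = [] then []
    else
      let n : Int := filtered.length
      let counts : PySem.Dict Int Int :=
        filtered.foldl (fun d s => s.foldl (fun d x => d.modify x 0 (· + 1)) d) PySem.Dict.empty
      PySem.List.sorted ((counts.items.filter (fun p => p.2 == n)).map (fun p => p.1)) (fun x => x) false

-- ===== PRECONDITION & SPEC =====
-- Pre_: each inner list encodes a Python set, i.e. holds distinct elements (the type convention
-- for set[int]); lists with duplicates are not encodings of any Python input, A itself is total.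
def Pre_intersect_sets (sets : List (List Int)) : Prop := ∀ s ∈ sets, s.Nodup
instance (sets : List (List Int)) : Decidable (Pre_intersect_sets sets) := by unfold Pre_intersect_sets; infer_instance

def pvWitness_intersect_sets : List (List Int) := [[1, 2, 3], [2, 3], []]

def Spec_intersect_sets (sets : List (List Int)) (out : List Int) : Prop := out = intersect_sets_alt sets
instance (sets : List (List Int)) (out : List Int) : Decidable (Spec_intersect_sets sets out) := by unfold Spec_intersect_sets; infer_instance

-- ===== CLAIM (what is proved, stated in full; the proofs are below) =====
def Claim_equal_intersect_sets : Prop := ∀ (sets : List (List Int)), Dom_intersect_sets sets → Pre_intersect_sets sets → Spec_intersect_sets sets (intersect_sets sets)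

-- ===== LEMMAS AND PROOFS =====

-- A's loop computes: keep the elements of `result` lying in every set of `rest`, then sort.
theorem pvIsectLoop_eq (rest : List (List Int)) : ∀ (result : List Int),
    pvIsectLoop result rest
      = PySem.List.sorted (result.filter (fun x => decide (∀ s ∈ rest, x ∈ s))) (fun x => x) false := by
  induction rest with
  | nil => intro result; simp [pvIsectLoop]
  | cons s rest ih =>
    intro result
    have hsplit : result.filter (fun x => decide (∀ t ∈ s :: rest, x ∈ t))
        = (result.filter (fun x => decide (x ∈ s))).filter (fun x => decide (∀ t ∈ rest, x ∈ t)) := by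
      simp [List.filter_filter, Bool.and_comm]
    simp only [pvIsectLoop, hsplit]
    split
    · rename_i h
      rw [h]
      simp [PySem.List.sorted]
    · exact ih _

-- count in the flattened list = number of (Nodup) member lists containing x
theorem count_flatten_eq_countP (x : Int) (l : List (List Int)) (h : ∀ s ∈ l, s.Nodup) :
    (l.flatten).count x = l.countP (fun s => decide (x ∈ s)) := by
  induction l with
  | nil => simp
  | cons s l ih =>
    have hs : s.Nodup := h s (by simp)
    have ihl := ih (fun t ht => h t (by simp [ht]))
    by_cases hx : x ∈ s
    · simp [hx, ihl, List.count_eq_one_of_mem hs hx]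
      omega
    · simp [hx, ihl, List.count_eq_zero_of_not_mem hx]
  
-- B's pre-sort list, after pushing filter/map through items_counter: elements of the flattened
-- filtered lists whose count equals the number of filtered lists.
theorem alt_list_eq (F : List Int) (n : Int) :
    (((PySem.Dict.counter F).items.filter (fun p => p.2 == n)).map (fun p => p.1))
      = (PySem.Set.ofList F).filter (fun k => decide ((F.count k : Int) = n)) := by
  rw [PySem.Dict.items_counter, List.filter_map, List.map_map]
  simp only [Function.comp_def, List.map_id']
  exact List.filter_congr (fun k _ => by rw [Bool.eq_iff_iff]; simp)

theorem intersect_sets_spec : Claim_equal_intersect_sets := by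
  intro sets _ hpre
  unfold Spec_intersect_sets intersect_sets intersect_sets_alt
  by_cases h0 : sets = []
  · simp [h0]
  simp only [if_neg h0]
  set filtered := sets.filter (fun s => decide (s ≠ [])) with hfdef
  by_cases hf : filtered = []
  · simp [hf]
  simp only [if_neg hf]
  -- the sorted filtered list is non-empty
  rcases heq : PySem.List.sorted filtered (fun s => s.length) false with _ | ⟨first, rest⟩
  · exact absurd ((PySem.List.sorted_eq_nil_iff _ _ _).mp heq) hf
  -- counts is the Counter of the flattened filtered lists
  have hcounts : filtered.foldl (fun d s => s.foldl (fun d x => d.modify x 0 (· + 1)) d) PySem.Dict.empty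
      = PySem.Dict.counter filtered.flatten := by
    rw [PySem.Dict.counter_eq_foldl, List.foldl_flatten]
  show pvIsectLoop first rest = _
  rw [pvIsectLoop_eq, hcounts, alt_list_eq]
  -- nodup of every filtered member
  have hnodup : ∀ s ∈ filtered, s.Nodup := fun s hs => hpre s (List.mem_filter.mp hs).1
  -- membership characterisation, then equality of the two sorts
  have hpermF : (first :: rest).Perm filtered := heq ▸ PySem.List.sorted_perm ..
  have hmem : ∀ x : Int,
      x ∈ first.filter (fun x => decide (∀ s ∈ rest, x ∈ s))
        ↔ x ∈ (PySem.Set.ofList filtered.flatten).filter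
              (fun k => decide ((filtered.flatten.count k : Int) = (filtered.length : Int))) := by
    intro x
    simp only [List.mem_filter, PySem.Set.mem_ofList, decide_eq_true_eq, List.mem_flatten,
      Nat.cast_inj, count_flatten_eq_countP x filtered hnodup, List.countP_eq_length]
    constructor
    · rintro ⟨hx1, hall⟩
      have hall' : ∀ s ∈ filtered, x ∈ s := by
        intro s hs
        rcases List.mem_cons.mp (hpermF.mem_iff.mpr hs) with h | h
        · exact h ▸ hx1
        · exact hall s h
      rcases List.exists_mem_of_ne_nil filtered hf with ⟨s0, hs0⟩
      exact ⟨⟨s0, hs0, hall' s0 hs0⟩, fun s hs => by simp [hall' s hs]⟩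
    · rintro ⟨-, hall⟩
      have hall' : ∀ s ∈ filtered, x ∈ s := fun s hs => by
        simpa using hall s hs
      have hfirst : first ∈ filtered := hpermF.mem_iff.mp (by simp)
      exact ⟨hall' first hfirst, fun s hs => hall' s (hpermF.mem_iff.mp (by simp [hs]))⟩
  have hA : (first.filter (fun x => decide (∀ s ∈ rest, x ∈ s))).Nodup :=
    (hnodup first (hpermF.mem_iff.mp (by simp))).filter _
  have hB : ((PySem.Set.ofList filtered.flatten).filter
      (fun k => decide ((filtered.flatten.count k : Int) = (filtered.length : Int)))).Nodup :=
    (PySem.Set.nodup_ofList _).filter _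
  exact PySem.List.sorted_eq_sorted_of_perm _ _ _ (fun a b h => h)
    ((List.perm_ext_iff_of_nodup hA hB).mpr hmem)
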